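-- pv_equiv track=rewrite | github.com/jgyy/python-bootcamp | 19/fibonacci.py | fib_sequence
-- ===== SOURCE A (Python) =====
-- def fib_sequence(num):
--     """
--     Generates a fibonacci sequence
--     with the size of n
--     """
--     assert num > 0
--
--     series = [1]
--
--     while len(series) < num:
--         if len(series) == 1:
--             series.append(1)
--         else:
--             series.append(series[-1] + series[-2])
--
--     for i, _ in enumerate(series):  # Convert the numbers to strings
--         series[i] = str(series[i])
--
--     return ", ".join(series)  # Return the sequence seperated by commas
-- ===== SOURCE B (Python) =====
-- def fib_sequence(num):
--     """
--     Generates a fibonacci sequence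
--     with the size of n
--     """
--     assert num > 0
--     result = []
--     while len(result) < num:
--         result.append(str(_fib_pair(len(result) + 1)[0]))
--     return ", ".join(result)
--
--
-- def _fib_pair(n):
--     # Fast doubling: returns (F(n), F(n+1)) with F(0) = 0, F(1) = 1,
--     # using F(2k) = F(k)*(2*F(k+1) - F(k)) and F(2k+1) = F(k)^2 + F(k+1)^2.
--     if n == 0:
--         return (0, 1)
--     a, b = _fib_pair(n // 2)
--     c = a * (2 * b - a)
--     d = a * a + b * b
--     if n % 2:
--         return (d, c + d)
--     return (c, d)
-- ===== Notes on version B (the rewrite author's own statement) =====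
-- stated objective: alternative
-- what changed: Each term is computed independently by recursive fast doubling (F(2k)=F(k)(2F(k+1)-F(k)), F(2k+1)=F(k)^2+F(k+1)^2) instead of extending a list by the additive recurrence with a len==1 special case and negative-index back-reads.
import Mathlib
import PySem

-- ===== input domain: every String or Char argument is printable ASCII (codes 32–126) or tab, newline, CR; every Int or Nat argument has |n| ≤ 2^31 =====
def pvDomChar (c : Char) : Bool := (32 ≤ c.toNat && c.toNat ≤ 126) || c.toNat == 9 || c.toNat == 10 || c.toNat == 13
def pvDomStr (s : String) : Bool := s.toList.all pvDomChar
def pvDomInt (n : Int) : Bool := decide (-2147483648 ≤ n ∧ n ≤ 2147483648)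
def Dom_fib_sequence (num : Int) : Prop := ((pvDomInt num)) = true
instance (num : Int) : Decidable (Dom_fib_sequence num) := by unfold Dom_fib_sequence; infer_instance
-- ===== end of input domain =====

-- ===== PORT A =====
-- B computes each term independently by recursive fast doubling instead of extending a
-- list by the additive recurrence; return value only, no observable mutation.
-- A's loop: while len(series) < num: append 1 (if len==1) or series[-1]+series[-2].
-- series[-1]/series[-2] are ported with pyGetD (always in range here: length ≥ 2 in that branch).
def fibLoopA (series : List Int) (num : Int) : List Int :=
  if _h : (series.length : Int) < num then
    if series.length = 1 then
      fibLoopA (series ++ [1]) num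
    else
      fibLoopA (series ++ [PySem.List.pyGetD series (-1) 0 + PySem.List.pyGetD series (-2) 0]) num
  else series
termination_by (num - series.length).toNat
decreasing_by all_goals (simp; omega)

def fib_sequence (num : Int) : String :=
  PySem.Str.join ", " ((fibLoopA [1] num).map PySem.Int.toStr)

-- ===== PORT B =====
-- _fib_pair: fast doubling, (F(n), F(n+1)) with F(0) = 0, F(1) = 1.
def fibPair (n : Nat) : Int × Int :=
  if h : n = 0 then (0, 1)
  else
    let p := fibPair (n / 2)
    let a := p.1
    let b := p.2
    let c := a * (2 * b - a)
    let d := a * a + b * b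
    if n % 2 = 1 then (d, c + d) else (c, d)
termination_by n
decreasing_by exact Nat.div_lt_self (Nat.pos_of_ne_zero h) (by omega)

def fibLoopB (result : List String) (num : Int) : List String :=
  if _h : (result.length : Int) < num then
    fibLoopB (result ++ [PySem.Int.toStr (fibPair (result.length + 1)).1]) num
  else result
termination_by (num - result.length).toNat
decreasing_by simp; omega

def fib_sequence_alt (num : Int) : String :=
  PySem.Str.join ", " (fibLoopB [] num)

-- ===== PRECONDITION & SPEC =====
-- Pre_ excludes exactly num ≤ 0, where A's (and B's) assert raises AssertionError.
def Pre_fib_sequence (num : Int) : Prop := 0 < num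
instance (num : Int) : Decidable (Pre_fib_sequence num) := by unfold Pre_fib_sequence; infer_instance
def pvWitness_fib_sequence : Int := (5)

def Spec_fib_sequence (num : Int) (out : String) : Prop := out = fib_sequence_alt num
instance (num : Int) (out : String) : Decidable (Spec_fib_sequence num out) := by unfold Spec_fib_sequence; infer_instance

-- ===== CLAIM (what is proved, stated in full; the proofs are below) =====
def Claim_equal_fib_sequence : Prop := ∀ (num : Int), Dom_fib_sequence num → Pre_fib_sequence num → Spec_fib_sequence num (fib_sequence num)

-- ===== LEMMAS AND PROOFS =====
def pvFib : Nat → Int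
  | 0 => 1
  | 1 => 1
  | n + 2 => pvFib n + pvFib (n + 1)

def pvFibs (n : Nat) : List Int := (List.range n).map pvFib

theorem pvFibs_length (n : Nat) : (pvFibs n).length = n := by
  simp [pvFibs]

theorem pvFibs_succ (n : Nat) : pvFibs (n + 1) = pvFibs n ++ [pvFib n] := by
  simp [pvFibs, List.range_succ]

theorem loopA_eq (fuel : Nat) : ∀ (num : Int) (k : Nat), 1 ≤ k → (num - k).toNat ≤ fuel →
    fibLoopA (pvFibs k) num = pvFibs (max k num.toNat) := by
  induction fuel with
  | zero =>
    intro num k hk hf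
    rw [fibLoopA]
    simp only [pvFibs_length]
    rw [dif_neg (by omega)]
    congr 1; omega
  | succ m ih =>
    intro num k hk hf
    rw [fibLoopA]
    simp only [pvFibs_length]
    by_cases h : (k : Int) < num
    · rw [dif_pos h]
      have hstep : pvFibs (k + 1) = (if k = 1 then pvFibs k ++ [1]
          else pvFibs k ++ [PySem.List.pyGetD (pvFibs k) (-1) 0 + PySem.List.pyGetD (pvFibs k) (-2) 0]) := by
        by_cases hk1 : k = 1
        · subst hk1
          simp [pvFibs, List.range_succ]
          decide
        · have hk2 : 2 ≤ k := by omega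
          rw [if_neg hk1, pvFibs_succ]
          congr 1
          rw [PySem.List.pyGetD_neg_ofNat (pvFibs k) 1 0 (by omega) (by rw [pvFibs_length]; omega),
              PySem.List.pyGetD_neg_ofNat (pvFibs k) 2 0 (by omega) (by rw [pvFibs_length]; omega)]
          simp only [pvFibs, List.getElem_map, List.getElem_range, List.length_map,
            List.length_range]
          obtain ⟨j, rfl⟩ : ∃ j, k = j + 2 := ⟨k - 2, by omega⟩
          rw [show j + 2 - 1 = j + 1 from by omega, show j + 2 - 2 = j from by omega, pvFib,
            Int.add_comm (pvFib j)]
      split_ifs with hk1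
      · have := hstep; rw [if_pos hk1] at this
        rw [← this, ih num (k+1) (by omega) (by omega)]
        congr 1; omega
      · have := hstep; rw [if_neg hk1] at this
        rw [← this, ih num (k+1) (by omega) (by omega)]
        congr 1; omega
    · rw [dif_neg h]
      congr 1; omega

theorem fib_two_mul_int (m : Nat) : (Nat.fib (2 * m) : Int)
    = (Nat.fib m : Int) * (2 * (Nat.fib (m + 1) : Int) - (Nat.fib m : Int)) := by
  have hle : Nat.fib m ≤ 2 * Nat.fib (m + 1) := by
    have := Nat.fib_le_fib_succ (n := m); omega
  rw [Nat.fib_two_mul]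
  push_cast [Nat.cast_sub hle]
  ring

theorem fib_two_mul_add_one_int (m : Nat) : (Nat.fib (2 * m + 1) : Int)
    = (Nat.fib m : Int) * (Nat.fib m : Int) + (Nat.fib (m + 1) : Int) * (Nat.fib (m + 1) : Int) := by
  rw [Nat.fib_two_mul_add_one]
  push_cast
  ring

theorem fibPair_eq (n : Nat) : fibPair n = ((Nat.fib n : Int), (Nat.fib (n + 1) : Int)) := by
  induction n using Nat.strong_induction_on with
  | _ n ih =>
    rw [fibPair]
    by_cases h : n = 0
    · subst h; decide
    · rw [dif_neg h]
      rw [ih (n / 2) (Nat.div_lt_self (Nat.pos_of_ne_zero h) one_lt_two)]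
      by_cases hodd : n % 2 = 1
      · obtain ⟨m, rfl⟩ : ∃ m, n = 2 * m + 1 := ⟨n / 2, by omega⟩
        have hm : (2 * m + 1) / 2 = m := by omega
        rw [if_pos hodd]
        simp only [hm]
        refine Prod.ext ?_ ?_
        · exact (fib_two_mul_add_one_int m).symm
        · show _ = (Nat.fib (2 * m + 1 + 1) : Int)
          rw [show 2 * m + 1 + 1 = 2 * m + 2 from rfl, Nat.fib_add_two]
          push_cast
          rw [fib_two_mul_int, fib_two_mul_add_one_int]
      · obtain ⟨m, rfl⟩ : ∃ m, n = 2 * m := ⟨n / 2, by omega⟩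
        rw [if_neg hodd]
        simp only [show (2 * m) / 2 = m from by omega]
        exact Prod.ext (fib_two_mul_int m).symm (fib_two_mul_add_one_int m).symm

theorem pvFib_eq : ∀ k, pvFib k = (Nat.fib (k + 1) : Int)
  | 0 => by decide
  | 1 => by decide
  | n + 2 => by
    rw [pvFib, pvFib_eq n, pvFib_eq (n + 1)]
    have hf : Nat.fib (n + 2 + 1) = Nat.fib (n + 1) + Nat.fib (n + 1 + 1) := by
      rw [show n + 2 + 1 = (n + 1) + 2 from rfl, Nat.fib_add_two]
    rw [hf]
    push_cast
    ring

theorem loopB_eq (fuel : Nat) : ∀ (num : Int) (k : Nat), (num - k).toNat ≤ fuel →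
    fibLoopB ((pvFibs k).map PySem.Int.toStr) num
      = (pvFibs (max k num.toNat)).map PySem.Int.toStr := by
  induction fuel with
  | zero =>
    intro num k hf
    rw [fibLoopB]
    simp only [List.length_map, pvFibs_length]
    rw [dif_neg (by omega)]
    congr 2; omega
  | succ m ih =>
    intro num k hf
    rw [fibLoopB]
    simp only [List.length_map, pvFibs_length]
    by_cases h : (k : Int) < num
    · rw [dif_pos h]
      have hterm : (fibPair (k + 1)).1 = pvFib k := by
        rw [fibPair_eq, pvFib_eq]
      have h1 : (pvFibs k).map PySem.Int.toStr ++ [PySem.Int.toStr (fibPair (k + 1)).1]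
          = (pvFibs (k + 1)).map PySem.Int.toStr := by
        rw [hterm, pvFibs_succ]; simp
      rw [h1, ih num (k + 1) (by omega)]
      congr 2; omega
    · rw [dif_neg h]
      congr 2; omega

-- ===== VERDICT (by name: the statement is the Claim_ definition above) =====
theorem fib_sequence_spec : Claim_equal_fib_sequence := by
  intro num _hdom hpre
  unfold Spec_fib_sequence fib_sequence fib_sequence_alt
  have hA : fibLoopA [1] num = pvFibs (max 1 num.toNat) := by
    have : pvFibs 1 = [1] := by decide
    rw [← this, loopA_eq (num - 1).toNat num 1 le_rfl le_rfl]
  have hB : fibLoopB [] num = (pvFibs (max 0 num.toNat)).map PySem.Int.toStr := by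
    have h := loopB_eq (num - 0).toNat num 0 le_rfl
    simp only [show ((pvFibs 0).map PySem.Int.toStr) = ([] : List String) from rfl] at h
    exact h
  rw [hA, hB]
  have hpre' : 0 < num := hpre
  have : max 1 num.toNat = max 0 num.toNat := by omega
  rw [this]
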